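-- pv_equiv track=rewrite | github.com/benperlmutter/ben-examples | email-chatbot/aug_update_emails.py | clean_email_content
-- ===== SOURCE A (Python) =====
-- def clean_email_content(content: str) -> str:
--     """Clean and process email content"""
--     if not content:
--         return ""
--
--     # Remove quoted text (email chains)
--     days = ["Sun", "Mon", "Tue", "Wed", "Thu", "Fri", "Sat"]
--     for day in days:
--         content = content.split(f"On {day},")[0]
--
--     # Clean up formatting
--     content = content.replace("\r\n", " ").replace("\n", " ").replace("\r", " ")
--     content = " ".join(content.split())  # Remove extra whitespace
--
--     return content.strip()
-- ===== SOURCE B (Python) =====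
-- def clean_email_content(content: str) -> str:
--     """Clean and process email content"""
--     # Find every day-marker position in one pass over the original string,
--     # then truncate once at the earliest one (instead of 7 sequential splits).
--     days = ["Sun", "Mon", "Tue", "Wed", "Thu", "Fri", "Sat"]
--     cuts = [i for i in (content.find(f"On {day},") for day in days) if i >= 0]
--     if cuts:
--         content = content[:min(cuts)]
--     content = content.replace("\r\n", " ").replace("\n", " ").replace("\r", " ")
--     return " ".join(content.split())
-- ===== Notes on version B (the rewrite author's own statement) =====
-- stated objective: simpler
-- what changed: B computes each day-marker's first position in the original string and truncates once at the minimum found position instead of A's seven sequential split-and-keep-first passes, and drops A's redundant leading guard and trailing strip, which the whitespace-collapsing join already makes no-ops.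
import Mathlib
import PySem

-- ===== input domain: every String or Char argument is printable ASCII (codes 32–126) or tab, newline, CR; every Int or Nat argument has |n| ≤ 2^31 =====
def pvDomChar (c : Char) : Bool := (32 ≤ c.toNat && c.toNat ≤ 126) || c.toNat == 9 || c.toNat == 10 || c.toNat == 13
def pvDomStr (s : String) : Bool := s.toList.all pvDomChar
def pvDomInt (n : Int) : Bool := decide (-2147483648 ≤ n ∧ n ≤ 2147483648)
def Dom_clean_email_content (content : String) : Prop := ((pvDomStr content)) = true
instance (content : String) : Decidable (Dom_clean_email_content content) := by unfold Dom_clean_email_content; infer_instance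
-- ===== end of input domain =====

-- B replaces A's seven destructive split-and-keep-first passes by computing each day
-- marker's first position in the ORIGINAL string and slicing once at the minimum, and
-- drops the redundant empty-string guard and final strip (objective: simpler).

-- ===== PORT A =====
-- 'content.split(sep)[0]': split? is some for the nonempty literal separators used
-- below, and Python's split always returns at least one piece, so [0] is headI.
def pvSplitHead (c : String) (sep : String) : String :=
  ((PySem.Str.split? c sep).getD []).headI

def clean_email_content (content : String) : String :=
  if content == "" then ""
  else
    -- for day in days: content = content.split(f"On {day},")[0]  (the seven
    -- f-strings f"On {day}," written out as the literals they evaluate to)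
    let content1 := ["On Sun,", "On Mon,", "On Tue,", "On Wed,", "On Thu,", "On Fri,",
        "On Sat,"].foldl pvSplitHead content
    let content2 := PySem.Str.replace (PySem.Str.replace (PySem.Str.replace content1
        "\r\n" " ") "\n" " ") "\r" " "
    PySem.Str.strip (PySem.Str.join " " (PySem.Str.split₀ content2))

-- ===== PORT B =====
-- 'if cuts: content = content[:min(cuts)]'
def pvTruncAt (content : String) (cuts : List Int) : String :=
  match PySem.List.min? cuts (fun i => i) with
  | some m => PySem.Str.slice content none (some m)
  | none => content

def clean_email_content_alt (content : String) : String :=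
  -- cuts = [i for i in (content.find(f"On {day},") for day in days) if i >= 0]
  let cuts := (["On Sun,", "On Mon,", "On Tue,", "On Wed,", "On Thu,", "On Fri,",
      "On Sat,"].map (fun m => PySem.Str.find content m)).filter (fun i => decide (0 ≤ i))
  let content1 := pvTruncAt content cuts
  let content2 := PySem.Str.replace (PySem.Str.replace (PySem.Str.replace content1
      "\r\n" " ") "\n" " ") "\r" " "
  PySem.Str.join " " (PySem.Str.split₀ content2)

-- ===== PRECONDITION & SPEC =====
def Spec_clean_email_content (content : String) (out : String) : Prop := out = clean_email_content_alt content
instance (content : String) (out : String) : Decidable (Spec_clean_email_content content out) := by unfold Spec_clean_email_content; infer_instance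

-- ===== CLAIM (what is proved, stated in full; the proofs are below) =====
def Claim_equal_clean_email_content : Prop := ∀ (content : String), Dom_clean_email_content content → Spec_clean_email_content content (clean_email_content content)

-- ===== LEMMAS AND PROOFS =====

-- the seven markers, as char lists
def pvM : List (List Char) :=
  ["On Sun,", "On Mon,", "On Tue,", "On Wed,", "On Thu,", "On Fri,", "On Sat,"].map String.toList

-- first match position of p in s, s.length if absent
def pvFpos (s p : List Char) : Nat :=
  if PySem.Chars.find s p = -1 then s.length else (PySem.Chars.find s p).toNat

def pvCut (s p : List Char) : List Char := s.take (pvFpos s p)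

-- least match position of any marker of L in s, s.length if none
def pvHit : List (List Char) → List Char → Nat
  | [], s => s.length
  | p :: L, s => min (pvFpos s p) (pvHit L s)

-- a marker starts with 'O' and contains no other 'O' (so two marker matches never overlap)
def pvOk (p : List Char) : Prop :=
  p ≠ [] ∧ p[0]? = some 'O' ∧ ∀ i : Nat, i < p.length → 0 < i → p[i]? ≠ some 'O'

theorem pvFpos_le (s p : List Char) : pvFpos s p ≤ s.length := by
  unfold pvFpos
  split
  · exact le_refl _
  · have := PySem.Chars.find_le_length s p
    omega

theorem pvFpos_not_prefix (s p : List Char) (hp : p ≠ []) :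
    ∀ i < pvFpos s p, ¬ p <+: s.drop i := by
  intro i hi hpre
  unfold pvFpos at hi
  split at hi
  · rename_i hfind
    rw [PySem.Chars.find_eq_neg_one_iff] at hfind
    exact hfind (hpre.isInfix.trans (List.drop_suffix i s).isInfix)
  · rename_i hfind
    have h0 : 0 ≤ PySem.Chars.find s p := by
      have := PySem.Chars.neg_one_le_find s p; omega
    exact (PySem.Chars.find_spec h0).2 i hi hpre

theorem pvFpos_spec (s p : List Char) (hp : p ≠ []) :
    pvFpos s p = s.length ∨ p <+: s.drop (pvFpos s p) := by
  unfold pvFpos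
  split
  · exact Or.inl rfl
  · rename_i hfind
    have h0 : 0 ≤ PySem.Chars.find s p := by
      have := PySem.Chars.neg_one_le_find s p; omega
    exact Or.inr (PySem.Chars.find_spec h0).1

theorem pvFpos_unique (s p : List Char) (n : Nat) (hp : p ≠ [])
    (h1 : ∀ i < n, ¬ p <+: s.drop i) (h2 : n = s.length ∨ p <+: s.drop n)
    (h3 : n ≤ s.length) : pvFpos s p = n := by
  rcases Nat.lt_trichotomy (pvFpos s p) n with hlt | heq | hgt
  · exfalso
    rcases pvFpos_spec s p hp with hlen | hpre
    · omega
    · exact h1 _ hlt hpre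
  · exact heq
  · exfalso
    rcases h2 with hlen | hpre
    · have := pvFpos_le s p; omega
    · exact pvFpos_not_prefix s p hp n hgt hpre

theorem pvFpos_of_prefix (s p : List Char) (hp : p ≠ []) (h : p <+: s) :
    pvFpos s p = 0 := by
  apply pvFpos_unique s p 0 hp
  · intro i hi; omega
  · right; simpa using h
  · exact Nat.zero_le _

theorem pvFpos_cons (c : Char) (rest p : List Char) (hp : p ≠ [])
    (h : ¬ p <+: c :: rest) : pvFpos (c :: rest) p = pvFpos rest p + 1 := by
  apply pvFpos_unique (c :: rest) p (pvFpos rest p + 1) hp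
  · intro i hi
    cases i with
    | zero => simpa using h
    | succ j =>
      rw [List.drop_succ_cons]
      exact pvFpos_not_prefix rest p hp j (by omega)
  · rcases pvFpos_spec rest p hp with hlen | hpre
    · left; simp [hlen]
    · right; rwa [List.drop_succ_cons]
  · have := pvFpos_le rest p; simp; omega

theorem pvSplitOn_go (p : List Char) (hp : p ≠ []) :
    ∀ (fuel : Nat) (l cur : List Char) (acc : List (List Char)), l.length ≤ fuel →
    ∃ tl, PySem.Chars.splitOn.go p fuel l cur acc =
      acc.reverse ++ (cur.reverse ++ pvCut l p) :: tl := by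
  intro fuel
  induction fuel with
  | zero =>
    intro l cur acc hlen
    have hl : l = [] := by cases l <;> simp_all
    subst hl
    refine ⟨[], ?_⟩
    rw [PySem.Chars.splitOn.go.eq_def]
    simp [pvCut]
  | succ fuel ih =>
    intro l cur acc hlen
    cases l with
    | nil =>
      refine ⟨[], ?_⟩
      rw [PySem.Chars.splitOn.go.eq_def]
      simp [pvCut]
    | cons c rest =>
      rw [PySem.Chars.splitOn.go.eq_def]
      by_cases hpre : p.isPrefixOf (c :: rest)
      · simp only [hpre, if_true]
        have hplen : 0 < p.length := List.length_pos_of_ne_nil hp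
        have hfuel : (List.drop p.length (c :: rest)).length ≤ fuel := by
          simp at hlen ⊢; omega
        obtain ⟨tl, htl⟩ := ih (List.drop p.length (c :: rest)) [] (cur.reverse :: acc) hfuel
        have hcut : pvCut (c :: rest) p = [] := by
          unfold pvCut
          rw [pvFpos_of_prefix _ _ hp (List.isPrefixOf_iff_prefix.1 hpre)]
          simp
        refine ⟨pvCut (List.drop p.length (c :: rest)) p :: tl, ?_⟩
        rw [htl, hcut]
        simp
      · simp only [hpre]
        obtain ⟨tl, htl⟩ := ih rest (c :: cur) acc (by simpa using Nat.lt_succ_iff.mp (by simpa using hlen))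
        refine ⟨tl, ?_⟩
        rw [htl]
        have hcut : pvCut (c :: rest) p = c :: pvCut rest p := by
          unfold pvCut
          rw [pvFpos_cons c rest p hp (fun hx => hpre (List.isPrefixOf_iff_prefix.2 hx))]
          simp
        rw [hcut]
        simp

theorem pvSplitOn_headI (s p : List Char) (hp : p ≠ []) :
    (PySem.Chars.splitOn s p).headI = pvCut s p := by
  unfold PySem.Chars.splitOn
  obtain ⟨tl, htl⟩ := pvSplitOn_go p hp (s.length + 1) s [] [] (by omega)
  rw [htl]
  simp

theorem pvChar_at (s p : List Char) (i j : Nat) (h : p <+: s.drop i) (hj : j < p.length) :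
    s[i + j]? = p[j]? := by
  obtain ⟨t, ht⟩ := h
  rw [← List.getElem?_drop, ← ht, List.getElem?_append_left hj]

-- cutting at p's first match does not move any later-processed marker's contribution below the cut
theorem pvLcut (s p q : List Char) (hp : pvOk p) (hq : pvOk q) :
    min (pvFpos s p) (pvFpos (s.take (pvFpos s p)) q) = min (pvFpos s p) (pvFpos s q) := by
  obtain ⟨hpne, hpO, hpO'⟩ := hp
  obtain ⟨hqne, hqO, hqO'⟩ := hq
  have hale : pvFpos s p ≤ s.length := pvFpos_le s p
  have hqlen : 0 < q.length := List.length_pos_of_ne_nil hqne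
  by_cases hfq : pvFpos s q < pvFpos s p
  · -- q's first match lies below the cut and survives it whole (markers cannot overlap)
    have hqpre : q <+: s.drop (pvFpos s q) := by
      rcases pvFpos_spec s q hqne with hl | hpre
      · omega
      · exact hpre
    have hqfit : q.length ≤ s.length - pvFpos s q := by
      have := hqpre.length_le
      simpa using this
    have hsep : pvFpos s q + q.length ≤ pvFpos s p := by
      by_contra hcon
      push_neg at hcon
      have haless : pvFpos s p < s.length := by omega
      have hppre : p <+: s.drop (pvFpos s p) := by
        rcases pvFpos_spec s p hpne with hl | hpre
        · omega
        · exact hpre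
      have h1 : s[pvFpos s p + 0]? = p[0]? :=
        pvChar_at s p (pvFpos s p) 0 hppre (List.length_pos_of_ne_nil hpne)
      have h2 : s[pvFpos s q + (pvFpos s p - pvFpos s q)]? = q[pvFpos s p - pvFpos s q]? :=
        pvChar_at s q (pvFpos s q) (pvFpos s p - pvFpos s q) hqpre (by omega)
      have h3 : pvFpos s q + (pvFpos s p - pvFpos s q) = pvFpos s p + 0 := by omega
      rw [h3, h1, hpO] at h2
      exact hqO' (pvFpos s p - pvFpos s q) (by omega) (by omega) h2.symm
    have heq : pvFpos (s.take (pvFpos s p)) q = pvFpos s q := by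
      apply pvFpos_unique _ _ _ hqne
      · intro i hi hpre
        rw [List.drop_take] at hpre
        exact pvFpos_not_prefix s q hqne i hi (List.prefix_take_iff.1 hpre).1
      · right
        rw [List.drop_take]
        exact List.prefix_take_iff.2 ⟨hqpre, by omega⟩
      · simp; omega
    rw [heq]
  · push_neg at hfq
    have heq : pvFpos (s.take (pvFpos s p)) q = (s.take (pvFpos s p)).length := by
      apply pvFpos_unique _ _ _ hqne
      · intro i hi hpre
        simp only [List.length_take] at hi
        rw [List.drop_take] at hpre
        obtain ⟨hpre', hlen'⟩ := List.prefix_take_iff.1 hpre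
        have hige : pvFpos s q ≤ i := by
          by_contra hcon
          push_neg at hcon
          exact pvFpos_not_prefix s q hqne i hcon hpre'
        omega
      · left; rfl
      · exact le_refl _
    rw [heq]
    simp only [List.length_take]
    omega

theorem pvHit_take (s : List Char) (p : List Char) (L : List (List Char)) (hp : pvOk p)
    (hL : ∀ q ∈ L, pvOk q) :
    min (pvFpos s p) (pvHit L (s.take (pvFpos s p))) = min (pvFpos s p) (pvHit L s) := by
  revert hL
  induction L with
  | nil =>
    intro _
    have := pvFpos_le s p
    simp only [pvHit, List.length_take]
    omega
  | cons q L ih =>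
    intro hL
    have h1 := pvLcut s p q hp (hL q (by simp))
    have h2 := ih (fun r hr => hL r (by simp [hr]))
    simp only [pvHit]
    omega

theorem pvHit_le_len (L : List (List Char)) (t : List Char) : pvHit L t ≤ t.length := by
  induction L with
  | nil => exact le_refl _
  | cons p L ih => simp only [pvHit]; omega

theorem pvFold_cut (L : List (List Char)) (hL : ∀ q ∈ L, pvOk q) :
    ∀ s : List Char, List.foldl pvCut s L = s.take (pvHit L s) := by
  revert hL
  induction L with
  | nil => intro _ s; simp [pvHit]
  | cons p L ih =>
    intro hL s
    have hp := hL p (by simp)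
    have hL' : ∀ q ∈ L, pvOk q := fun q hq => hL q (by simp [hq])
    simp only [List.foldl_cons]
    rw [ih hL' (pvCut s p)]
    show (pvCut s p).take (pvHit L (pvCut s p)) = _
    unfold pvCut
    rw [List.take_take]
    have h1 := pvHit_take s p L hp hL'
    have h2 := pvHit_le_len L (s.take (pvFpos s p))
    simp only [List.length_take] at h2
    have h3 : min (pvHit L (s.take (pvFpos s p))) (pvFpos s p)
        = min (pvFpos s p) (pvHit L s) := by omega
    rw [h3]
    simp only [pvHit]

theorem pvHeadI_map_ofList (ps : List (List Char)) :
    (List.map String.ofList ps).headI.toList = ps.headI := by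
  cases ps with
  | nil => rfl
  | cons a l => simp [List.headI]

theorem pvSplitHead_toList (c m : String) (hm : m.toList ≠ []) :
    (pvSplitHead c m).toList = pvCut c.toList m.toList := by
  unfold pvSplitHead PySem.Str.split? PySem.Chars.split?
  have hemp : m.toList.isEmpty = false := by simpa [List.isEmpty_iff] using hm
  rw [hemp]
  simp only [Bool.false_eq_true, if_false, Option.map_some, Option.getD_some]
  rw [pvHeadI_map_ofList]
  exact pvSplitOn_headI _ _ hm

theorem pvFoldA_toList (ms : List String) (hm : ∀ m ∈ ms, m.toList ≠ []) :
    ∀ c : String, (ms.foldl pvSplitHead c).toList =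
      List.foldl pvCut c.toList (ms.map String.toList) := by
  revert hm
  induction ms with
  | nil => intro _ c; simp
  | cons m ms ih =>
    intro hm c
    simp only [List.foldl_cons, List.map_cons]
    rw [ih (fun x hx => hm x (by simp [hx])), pvSplitHead_toList c m (hm m (by simp))]

theorem pvHit_le (t : List Char) (L : List (List Char)) (p : List Char) (h : p ∈ L) :
    pvHit L t ≤ pvFpos t p := by
  induction L with
  | nil => cases h
  | cons r L ih =>
    rcases List.mem_cons.1 h with h1 | h2
    · subst h1; simp only [pvHit]; omega
    · simp only [pvHit]; have := ih h2; omega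

theorem pvHit_cases (t : List Char) (L : List (List Char)) (h : L ≠ []) :
    ∃ p ∈ L, pvHit L t = pvFpos t p := by
  induction L with
  | nil => exact absurd rfl h
  | cons r L ih =>
    cases L with
    | nil =>
      refine ⟨r, by simp, ?_⟩
      simp only [pvHit]
      have := pvFpos_le t r
      omega
    | cons b L' =>
      obtain ⟨q, hqmem, hq⟩ := ih (by simp)
      by_cases hc : pvFpos t r ≤ pvFpos t q
      · refine ⟨r, by simp, ?_⟩
        simp only [pvHit] at hq ⊢
        omega
      · refine ⟨q, by simp [List.mem_cons.1 hqmem], ?_⟩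
        simp only [pvHit] at hq ⊢
        omega

theorem pvHit_notfound (t : List Char) (L : List (List Char))
    (h : ∀ p ∈ L, PySem.Chars.find t p = -1) : pvHit L t = t.length := by
  revert h
  induction L with
  | nil => intro _; rfl
  | cons p L ih =>
    intro h
    simp only [pvHit]
    rw [ih (fun q hq => h q (by simp [hq]))]
    have hfp : pvFpos t p = t.length := by
      unfold pvFpos; rw [h p (by simp)]; simp
    rw [hfp]
    omega

-- B's cut equals the fold of A's cuts, at char level
theorem pvB_cut (t : List Char) :
    (match PySem.List.min? (((pvM.map (fun p => PySem.Chars.find t p)).filter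
        (fun i => decide (0 ≤ i)))) (fun i => i) with
      | some m => PySem.List.slice t none (some m)
      | none => t) = t.take (pvHit pvM t) := by
  cases hmin : PySem.List.min? ((pvM.map (fun p => PySem.Chars.find t p)).filter
      (fun i => decide (0 ≤ i))) (fun i => i) with
  | none =>
    rw [PySem.List.min?_eq_none_iff] at hmin
    have hall : ∀ p ∈ pvM, PySem.Chars.find t p = -1 := by
      intro p hp
      by_contra hne
      have h0 : (0:Int) ≤ PySem.Chars.find t p := by
        have := PySem.Chars.neg_one_le_find t p; omega
      have hmem : PySem.Chars.find t p ∈ (pvM.map (fun p => PySem.Chars.find t p)).filter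
          (fun i => decide (0 ≤ i)) :=
        List.mem_filter.2 ⟨List.mem_map.2 ⟨p, hp, rfl⟩, by simpa using h0⟩
      rw [hmin] at hmem
      cases hmem
    rw [pvHit_notfound t pvM hall, List.take_length]
  | some m =>
    have hmem := PySem.List.min?_mem hmin
    obtain ⟨hmap, hpos⟩ := List.mem_filter.1 hmem
    obtain ⟨p, hpM, hfp⟩ := List.mem_map.1 hmap
    have h0 : (0:Int) ≤ m := by simpa using hpos
    have hfpos : pvFpos t p = m.toNat := by
      unfold pvFpos
      rw [hfp]
      have hne : ¬ (m = -1) := by omega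
      simp [hne]
    have hle1 : pvHit pvM t ≤ m.toNat := by
      rw [← hfpos]; exact pvHit_le t pvM p hpM
    have hle2 : m.toNat ≤ pvHit pvM t := by
      obtain ⟨q, hqM, hq⟩ := pvHit_cases t pvM (by simp [pvM])
      by_cases hfq : PySem.Chars.find t q = -1
      · have hql : pvFpos t q = t.length := by unfold pvFpos; simp [hfq]
        have hmlen := PySem.Chars.find_le_length t p
        rw [hq, hql]
        rw [← hfp] at h0 ⊢
        omega
      · have h0q : (0:Int) ≤ PySem.Chars.find t q := by
          have := PySem.Chars.neg_one_le_find t q; omega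
        have hqcuts : PySem.Chars.find t q ∈ (pvM.map (fun p => PySem.Chars.find t p)).filter
            (fun i => decide (0 ≤ i)) :=
          List.mem_filter.2 ⟨List.mem_map.2 ⟨q, hqM, rfl⟩, by simpa using h0q⟩
        have hmle := PySem.List.min?_isMin hmin _ hqcuts
        simp only at hmle
        have hqv : pvFpos t q = (PySem.Chars.find t q).toNat := by
          unfold pvFpos; simp [hfq]
        rw [hq, hqv]
        omega
    have hfin : m.toNat = pvHit pvM t := by omega
    show PySem.List.slice t none (some m) = _
    rw [PySem.List.slice_to t h0, hfin]

theorem pvTruncAt_toList (content : String) :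
    (pvTruncAt content ((["On Sun,", "On Mon,", "On Tue,", "On Wed,", "On Thu,", "On Fri,",
        "On Sat,"].map (fun m => PySem.Str.find content m)).filter
        (fun i => decide (0 ≤ i)))).toList
      = content.toList.take (pvHit pvM content.toList) := by
  have hscrut : ["On Sun,", "On Mon,", "On Tue,", "On Wed,", "On Thu,", "On Fri,",
      "On Sat,"].map (fun m => PySem.Str.find content m)
      = pvM.map (fun p => PySem.Chars.find content.toList p) := by
    simp [pvM]
  unfold pvTruncAt
  rw [hscrut, ← pvB_cut content.toList]
  cases PySem.List.min? ((pvM.map (fun p => PySem.Chars.find content.toList p)).filter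
      (fun i => decide (0 ≤ i))) (fun i => i) with
  | none => rfl
  | some m => simp [PySem.Str.toList_slice]

theorem pvSplit0_go_ok (s : List Char) :
    ∀ (cur : List Char) (acc : List (List Char)),
      (∀ c ∈ cur, PySem.Chars.isspace c = false) →
      (∀ w ∈ acc, w ≠ [] ∧ ∀ c ∈ w, PySem.Chars.isspace c = false) →
      ∀ w ∈ PySem.Chars.split₀.go s cur acc,
        w ≠ [] ∧ ∀ c ∈ w, PySem.Chars.isspace c = false := by
  induction s with
  | nil =>
    intro cur acc hcur hacc w hw
    rw [PySem.Chars.split₀.go.eq_def] at hw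
    cases hemp : cur.isEmpty with
    | true => simp only [hemp, if_true] at hw; exact hacc w (by simpa using hw)
    | false =>
      simp only [hemp, Bool.false_eq_true, if_false, List.reverse_cons, List.mem_append,
        List.mem_reverse, List.mem_cons] at hw
      rcases hw with hw | hw | hw
      · exact hacc w hw
      · subst hw
        constructor
        · simp only [ne_eq, List.reverse_eq_nil_iff]
          intro hnil
          rw [hnil] at hemp
          simp at hemp
        · intro c hc
          exact hcur c (List.mem_reverse.1 hc)
      · cases hw
  | cons a s ih =>
    intro cur acc hcur hacc w hw
    rw [PySem.Chars.split₀.go.eq_def] at hw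
    cases hsp : PySem.Chars.isspace a with
    | true =>
      simp only [hsp, if_true] at hw
      cases hemp : cur.isEmpty with
      | true =>
        simp only [hemp, if_true] at hw
        exact ih [] acc (by simp) hacc w hw
      | false =>
        simp only [hemp, Bool.false_eq_true, if_false] at hw
        refine ih [] (cur.reverse :: acc) (by simp) ?_ w hw
        intro v hv
        rcases List.mem_cons.1 hv with hv | hv
        · subst hv
          constructor
          · simp only [ne_eq, List.reverse_eq_nil_iff]
            intro hnil
            rw [hnil] at hemp
            simp at hemp
          · intro c hc
            exact hcur c (List.mem_reverse.1 hc)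
        · exact hacc v hv
    | false =>
      simp only [hsp, Bool.false_eq_true, if_false] at hw
      refine ih (a :: cur) acc ?_ hacc w hw
      intro c hc
      rcases List.mem_cons.1 hc with hc | hc
      · subst hc; exact hsp
      · exact hcur c hc

theorem pvWords_ok (u : List Char) :
    ∀ w ∈ PySem.Chars.split₀ u, w ≠ [] ∧ ∀ c ∈ w, PySem.Chars.isspace c = false := by
  unfold PySem.Chars.split₀
  exact pvSplit0_go_ok u [] [] (by simp) (by simp)

theorem pvLstrip_eq (l : List Char)
    (h : ∀ c, l.head? = some c → PySem.Chars.isspace c = false) :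
    PySem.Chars.lstrip l = l := by
  unfold PySem.Chars.lstrip
  cases l with
  | nil => rfl
  | cons a l => exact List.dropWhile_cons_of_neg (by simpa using h a rfl)

theorem pvRstrip_eq (l : List Char)
    (h : ∀ c, l.getLast? = some c → PySem.Chars.isspace c = false) :
    PySem.Chars.rstrip l = l := by
  unfold PySem.Chars.rstrip
  have hdw : List.dropWhile PySem.Chars.isspace l.reverse = l.reverse := by
    cases hr : l.reverse with
    | nil => rfl
    | cons a r =>
      apply List.dropWhile_cons_of_neg
      have h2 : l.reverse.head? = l.getLast? := List.head?_reverse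
      rw [hr] at h2
      simpa using h a h2.symm
  rw [hdw, List.reverse_reverse]

theorem pvJoin_ne_nil (ws : List (List Char)) (h : ∀ w ∈ ws, w ≠ []) (hws : ws ≠ []) :
    PySem.Chars.join [' '] ws ≠ [] := by
  cases ws with
  | nil => exact absurd rfl hws
  | cons w rest =>
    cases rest with
    | nil => rw [PySem.Chars.join_singleton]; exact h w (by simp)
    | cons b r =>
      rw [PySem.Chars.join_cons_cons]
      have := h w (by simp)
      cases w with
      | nil => exact absurd rfl this
      | cons x w' => simp

theorem pvJoin_head (ws : List (List Char))
    (h : ∀ w ∈ ws, w ≠ [] ∧ ∀ c ∈ w, PySem.Chars.isspace c = false) :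
    ∀ c, (PySem.Chars.join [' '] ws).head? = some c → PySem.Chars.isspace c = false := by
  intro c hc
  cases ws with
  | nil => rw [PySem.Chars.join_nil] at hc; cases hc
  | cons w rest =>
    obtain ⟨hwne, hwch⟩ := h w (by simp)
    cases w with
    | nil => exact absurd rfl hwne
    | cons a w' =>
      have hca : c = a := by
        cases rest with
        | nil =>
          rw [PySem.Chars.join_singleton] at hc
          simpa using hc.symm
        | cons b r =>
          rw [PySem.Chars.join_cons_cons] at hc
          simp only [List.cons_append, List.head?_cons] at hc
          simpa using hc.symm
      subst hca
      exact hwch c (by simp)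

theorem pvJoin_last (ws : List (List Char))
    (h : ∀ w ∈ ws, w ≠ [] ∧ ∀ c ∈ w, PySem.Chars.isspace c = false) :
    ∀ c, (PySem.Chars.join [' '] ws).getLast? = some c → PySem.Chars.isspace c = false := by
  induction ws with
  | nil => intro c hc; rw [PySem.Chars.join_nil] at hc; cases hc
  | cons w rest ih =>
    intro c hc
    cases rest with
    | nil =>
      rw [PySem.Chars.join_singleton] at hc
      exact (h w (by simp)).2 c (List.mem_of_getLast? hc)
    | cons b r =>
      rw [PySem.Chars.join_cons_cons] at hc
      have hne : PySem.Chars.join [' '] (b :: r) ≠ [] :=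
        pvJoin_ne_nil (b :: r) (fun v hv => (h v (by simp [hv])).1) (by simp)
      rw [List.getLast?_append_of_ne_nil _ hne] at hc
      exact ih (fun v hv => h v (by simp [hv])) c hc

theorem pvStrip_join (ws : List (List Char))
    (h : ∀ w ∈ ws, w ≠ [] ∧ ∀ c ∈ w, PySem.Chars.isspace c = false) :
    PySem.Chars.strip (PySem.Chars.join [' '] ws) = PySem.Chars.join [' '] ws := by
  unfold PySem.Chars.strip
  rw [pvLstrip_eq _ (pvJoin_head ws h), pvRstrip_eq _ (pvJoin_last ws h)]

theorem pvM_ok : ∀ p ∈ pvM, pvOk p := by unfold pvOk; decide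

-- ===== VERDICT (by name: the statement is the Claim_ definition above) =====
theorem clean_email_content_spec : Claim_equal_clean_email_content := by
  unfold Claim_equal_clean_email_content
  intro content _
  unfold Spec_clean_email_content clean_email_content clean_email_content_alt
  by_cases hemp : content = ""
  · subst hemp; decide
  · have hbeq : ¬ ((content == "") = true) := by simpa using hemp
    rw [if_neg hbeq]
    apply String.toList_inj.mp
    have hA : (["On Sun,", "On Mon,", "On Tue,", "On Wed,", "On Thu,", "On Fri,",
        "On Sat,"].foldl pvSplitHead content).toList
        = content.toList.take (pvHit pvM content.toList) := by
      rw [pvFoldA_toList _ (by decide) content]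
      exact pvFold_cut _ pvM_ok content.toList
    have hB := pvTruncAt_toList content
    have hsp : (" " : String).toList = [' '] := rfl
    simp only [PySem.Str.toList_strip, PySem.Str.toList_join, PySem.Str.split₀_map_toList,
      PySem.Str.toList_replace, hA, hB, hsp]
    exact pvStrip_join _ (pvWords_ok _)
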